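-- pv_equiv track=rewrite | github.com/ervinni7/siguriaetedhenave_gr10 | mystransposition.py | get_column_order
-- ===== SOURCE A (Python) =====
-- def get_column_order(key: str) -> list[int]:
--     key = key.upper()
--     sorted_chars = sorted(enumerate(key), key=lambda x: (x[1], x[0]))
--     order = [0] * len(key)
--
--     rank = 0
--     i = 0
--     while i < len(sorted_chars):
--         j = i
--         while j < len(sorted_chars) and sorted_chars[j][1] == sorted_chars[i][1]:
--             j += 1
--         for idx, _ in sorted_chars[i:j]:
--             order[idx] = rank
--         rank += 1
--         i = j
--
--     return order
-- ===== SOURCE B (Python) =====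
-- def get_column_order(key: str) -> list[int]:
--     ku = key.upper()
--     rank = {c: i for i, c in enumerate(sorted(set(ku)))}
--     return [rank[c] for c in ku]
-- ===== Notes on version B (the rewrite author's own statement) =====
-- stated objective: simpler
-- what changed: B replaces A's sort of (index, char) pairs plus nested grouping while-loops with a rank table: sorted(set(key)) gives the distinct characters in order, a dict maps each to its index, and one comprehension reads the dense rank per position.
import Mathlib
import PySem

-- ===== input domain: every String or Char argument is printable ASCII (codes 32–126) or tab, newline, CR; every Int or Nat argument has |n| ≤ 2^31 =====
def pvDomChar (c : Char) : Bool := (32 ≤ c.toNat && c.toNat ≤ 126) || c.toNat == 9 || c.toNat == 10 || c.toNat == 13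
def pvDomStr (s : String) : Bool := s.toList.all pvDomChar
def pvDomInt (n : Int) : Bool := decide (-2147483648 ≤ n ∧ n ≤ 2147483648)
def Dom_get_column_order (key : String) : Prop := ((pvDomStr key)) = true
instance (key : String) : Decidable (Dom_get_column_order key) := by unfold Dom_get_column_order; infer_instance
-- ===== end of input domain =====

-- B computes the same dense column ranks with a rank table built from sorted(set(key)) instead of A's
-- sort of (index, char) pairs followed by nested grouping while-loops (objective: simpler).

-- ===== PORT A =====
-- A's outer 'while i < len(sorted_chars)' loop: each step takes the group of pairs sharing the
-- current character (the inner 'while j' scan, i.e. takeWhile/dropWhile on the sorted list), writes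
-- 'order[idx] = rank' for each pair (idx, _) of the group, and continues after the group with rank+1.
def pvLoopA : List (Int × Char) → Int → List Int → List Int
  | [], _, order => order
  | p :: rest, rank, order =>
    pvLoopA (List.dropWhile (fun q => q.2 == p.2) (p :: rest)) (rank + 1)
      ((List.takeWhile (fun q => q.2 == p.2) (p :: rest)).foldl
        (fun o q => PySem.List.pySetD o q.1 rank) order)
  termination_by s => s.length
  decreasing_by
    simp only [List.dropWhile_cons, beq_self_eq_true, if_pos]
    exact Nat.lt_succ_of_le (List.length_dropWhile_le _ rest)

def get_column_order (key : String) : List Int :=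
  let ku := PySem.Chars.upper key.toList
  let sorted_chars := PySem.List.sorted2 (PySem.List.enumerate ku) (fun x => x.2) (fun x => x.1)
  let order := List.replicate ku.length (0 : Int)
  pvLoopA sorted_chars 0 order

-- ===== PORT B =====
def get_column_order_alt (key : String) : List Int :=
  let ku := PySem.Chars.upper key.toList
  -- rank = {c: i for i, c in enumerate(sorted(set(ku)))}
  let rank := (PySem.List.enumerate (PySem.List.sorted (PySem.Set.ofList ku) (fun c => c))).foldl
    (fun d p => d.insert p.2 p.1) (PySem.Dict.empty : PySem.Dict Char Int)
  -- rank[c]: c always occurs in ku, hence is a key of rank; get? is some and the 0 default is never used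
  ku.map (fun c => (PySem.Dict.get? rank c).getD 0)

-- ===== PRECONDITION & SPEC =====
def Spec_get_column_order (key : String) (out : List Int) : Prop := out = get_column_order_alt key
instance (key : String) (out : List Int) : Decidable (Spec_get_column_order key out) := by unfold Spec_get_column_order; infer_instance

-- ===== CLAIM (what is proved, stated in full; the proofs are below) =====
def Claim_equal_get_column_order : Prop := ∀ (key : String), Dom_get_column_order key → Spec_get_column_order key (get_column_order key)

-- ===== LEMMAS AND PROOFS =====

-- the common value both programs compute at a position holding character c:
-- the number of distinct characters of the key that are smaller than c (c's dense rank)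
def pvDcount (cs : List Char) (c : Char) : Nat :=
  (cs.toFinset.filter (fun d => d < c)).card

theorem pvDcount_congr (cs cs' : List Char) (c : Char) (h : ∀ x, x ∈ cs ↔ x ∈ cs') :
    pvDcount cs c = pvDcount cs' c := by
  unfold pvDcount
  congr 1
  ext x
  simp [h x]

theorem pvDcount_eq_zero (cs : List Char) (c : Char) (h : ∀ x ∈ cs, ¬ x < c) :
    pvDcount cs c = 0 := by
  unfold pvDcount
  rw [Finset.card_eq_zero, Finset.filter_eq_empty_iff]
  intro x hx
  exact h x (List.mem_toFinset.mp hx)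

theorem pvDcount_step (cs cs' : List Char) (b c : Char) (hbc : b < c)
    (hmem : ∀ x, x ∈ cs ↔ x = b ∨ x ∈ cs') (hgt : ∀ x ∈ cs', b < x) :
    pvDcount cs c = 1 + pvDcount cs' c := by
  unfold pvDcount
  have h1 : cs.toFinset = insert b cs'.toFinset := by
    ext x; simp [hmem x]
  rw [h1, Finset.filter_insert, if_pos hbc,
      Finset.card_insert_of_notMem (fun hb => lt_irrefl b (hgt b (List.mem_toFinset.mp (Finset.mem_of_mem_filter b hb))))]
  omega

theorem pvGrpFold_length (grp : List (Int × Char)) (r : Int) (order : List Int) :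
    (grp.foldl (fun o q => PySem.List.pySetD o q.1 r) order).length = order.length := by
  induction grp generalizing order with
  | nil => rfl
  | cons q rest ih => simp [ih, PySem.List.length_pySetD]

theorem pvLoopA_length (s : List (Int × Char)) (r : Int) (order : List Int) :
    (pvLoopA s r order).length = order.length := by
  induction s, r, order using pvLoopA.induct with
  | case1 => simp [pvLoopA]
  | case2 p rest rank o ih => rw [pvLoopA]; rw [ih, pvGrpFold_length]

theorem pvGrpFold_getElem? (grp : List (Int × Char)) (r : Int) (order : List Int)
    (hb : ∀ q ∈ grp, 0 ≤ q.1 ∧ q.1.toNat < order.length) (k : Nat) (hk : k < order.length) :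
    ((grp.foldl (fun o q => PySem.List.pySetD o q.1 r) order)[k]?) =
      if (k : Int) ∈ grp.map Prod.fst then some r else order[k]? := by
  induction grp generalizing order with
  | nil => simp
  | cons q rest ih =>
    simp only [List.foldl_cons, List.map_cons, List.mem_cons]
    have hq := hb q List.mem_cons_self
    rw [PySem.List.pySetD_of_nonneg _ _ hq.1]
    rw [ih _ (fun p hp => by
        have := hb p (List.mem_cons_of_mem _ hp)
        simpa [List.length_set] using this) (by simpa [List.length_set] using hk)]
    by_cases hmem : (k : Int) ∈ rest.map Prod.fst
    · simp [hmem]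
    · by_cases hqk : (k : Int) = q.1
      · have : q.1.toNat = k := by omega
        simp [hqk, this, hk]
      · have : q.1.toNat ≠ k := by omega
        simp [hmem, hqk, this]

-- main invariant of A's outer loop over the (weakly char-sorted) pair list s:
-- position k is written with rank r + (number of distinct chars of s smaller than ku[k])
theorem pvLoopA_spec (ku : List Char) : ∀ (s : List (Int × Char)) (r : Int) (order : List Int),
    s.Pairwise (fun p q => p.2 ≤ q.2) →
    (∀ p ∈ s, 0 ≤ p.1 ∧ p.1.toNat < ku.length ∧ ku[p.1.toNat]? = some p.2) →
    order.length = ku.length →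
    ∀ k, (hk : k < ku.length) →
    (pvLoopA s r order)[k]? =
      if (k : Int) ∈ s.map Prod.fst then some (r + (pvDcount (s.map Prod.snd) (ku[k]) : Int))
      else order[k]? := by
  intro s r order
  induction s, r, order using pvLoopA.induct with
  | case1 => simp [pvLoopA]
  | case2 p rest rank order ih =>
    intro hpair hb hlen k hk
    have hpredp : (fun q : Int × Char => q.2 == p.2) p = true := by simp
    set grp := List.takeWhile (fun q : Int × Char => q.2 == p.2) (p :: rest) with hgrp
    set rest' := List.dropWhile (fun q : Int × Char => q.2 == p.2) (p :: rest) with hrest'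
    have hsplit : grp ++ rest' = p :: rest := List.takeWhile_append_dropWhile
    have hgrpchar : ∀ q ∈ grp, q.2 = p.2 := fun q hq => by
      simpa using List.mem_takeWhile_imp hq
    have hrest'sub : rest'.Sublist (p :: rest) := by
      rw [hrest']; exact List.dropWhile_sublist _
    have hrest'pair : rest'.Pairwise (fun a b : Int × Char => a.2 ≤ b.2) :=
      hpair.sublist hrest'sub
    have hrest'gt : ∀ q ∈ rest', p.2 < q.2 := by
      rcases he : rest' with _ | ⟨e, t⟩
      · intro q hq; simp at hq
      · have hehead : (fun q : Int × Char => q.2 == p.2) e = false := by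
          have := List.head?_dropWhile_not (fun q : Int × Char => q.2 == p.2) (p :: rest)
          rw [← hrest', he] at this
          simpa using this
        have hene : e.2 ≠ p.2 := by simpa using hehead
        have hemem : e ∈ rest := by
          have : e ∈ rest' := by rw [he]; exact List.mem_cons_self
          have h2 : rest' = List.dropWhile (fun q : Int × Char => q.2 == p.2) rest := by
            rw [hrest', List.dropWhile_cons, if_pos hpredp]
          exact (List.dropWhile_sublist _).mem (h2 ▸ this)
        have hpe : p.2 < e.2 :=
          lt_of_le_of_ne (List.rel_of_pairwise_cons hpair hemem) (Ne.symm hene)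
        intro q hq
        rcases List.mem_cons.mp hq with rfl | hqt
        · exact hpe
        · exact lt_of_lt_of_le hpe
            (List.rel_of_pairwise_cons (R := fun a b : Int × Char => a.2 ≤ b.2) (he ▸ hrest'pair) hqt)
    have hb' : ∀ q ∈ rest', 0 ≤ q.1 ∧ q.1.toNat < ku.length ∧ ku[q.1.toNat]? = some q.2 :=
      fun q hq => hb q (hrest'sub.mem hq)
    have hgrpmem : ∀ q ∈ grp, q ∈ p :: rest := fun q hq => by
      rw [← hsplit]; exact List.mem_append_left _ hq
    -- chars of (p :: rest) as a set: {p.2} ∪ chars of rest'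
    have hchars : ∀ x, x ∈ (p :: rest).map Prod.snd ↔ x = p.2 ∨ x ∈ rest'.map Prod.snd := by
      intro x
      rw [← hsplit, List.map_append, List.mem_append]
      constructor
      · rintro (hx | hx)
        · left
          rcases List.mem_map.mp hx with ⟨q, hq, rfl⟩
          exact hgrpchar q hq
        · right; exact hx
      · rintro (rfl | hx)
        · left
          exact List.mem_map.mpr ⟨p, by
            have : p ∈ grp := by
              rw [hgrp, List.takeWhile_cons, if_pos hpredp]
              exact List.mem_cons_self
            exact ⟨this, rfl⟩⟩
        · right; exact hx
    rw [pvLoopA]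
    rw [ih hrest'pair hb' (by rw [pvGrpFold_length]; exact hlen) k hk]
    have hfold := pvGrpFold_getElem? grp rank order
      (fun q hq => ⟨(hb q (hgrpmem q hq)).1, by
        rw [hlen]; exact (hb q (hgrpmem q hq)).2.1⟩) k (by rw [hlen]; exact hk)
    by_cases hkrest : (k : Int) ∈ rest'.map Prod.fst
    · -- k is written in a later group; its char is > p.2
      rcases List.mem_map.mp hkrest with ⟨q, hq, hq1⟩
      have hqk : q.1.toNat = k := by have := (hb' q hq).1; omega
      have hkc : ku[k] = q.2 := by
        have h3 := (hb' q hq).2.2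
        rw [hqk] at h3
        have : ku[k]? = some ku[k] := List.getElem?_eq_getElem hk
        rw [this] at h3; exact Option.some_inj.mp h3
      have hkmem : (k : Int) ∈ (p :: rest).map Prod.fst := by
        rw [← hsplit, List.map_append, List.mem_append]; right; exact hkrest
      rw [if_pos hkrest, if_pos hkmem]
      have hstep : pvDcount ((p :: rest).map Prod.snd) (ku[k])
          = 1 + pvDcount (rest'.map Prod.snd) (ku[k]) := by
        refine pvDcount_step _ _ p.2 _ ?_ hchars ?_
        · rw [hkc]; exact hrest'gt q hq
        · intro x hx
          rcases List.mem_map.mp hx with ⟨q', hq', rfl⟩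
          exact hrest'gt q' hq'
      rw [hstep]
      congr 1
      push_cast
      ring
    · rw [if_neg hkrest, hfold]
      by_cases hkgrp : (k : Int) ∈ grp.map Prod.fst
      · -- k is written in this group with the current rank; its char is p.2
        rcases List.mem_map.mp hkgrp with ⟨q, hq, hq1⟩
        have hq0 := hb q (hgrpmem q hq)
        have hqk : q.1.toNat = k := by have := hq0.1; omega
        have hkc : ku[k] = p.2 := by
          have h3 := hq0.2.2
          rw [hqk] at h3
          have : ku[k]? = some ku[k] := List.getElem?_eq_getElem hk
          rw [this] at h3
          rw [← hgrpchar q hq]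
          exact Option.some_inj.mp h3
        have hkmem : (k : Int) ∈ (p :: rest).map Prod.fst := by
          rw [← hsplit, List.map_append, List.mem_append]; left; exact hkgrp
        rw [if_pos hkgrp, if_pos hkmem]
        have hz : pvDcount ((p :: rest).map Prod.snd) (ku[k]) = 0 := by
          refine pvDcount_eq_zero _ _ ?_
          intro x hx
          rw [hkc]
          rcases (hchars x).mp hx with rfl | hx'
          · exact lt_irrefl _
          · rcases List.mem_map.mp hx' with ⟨q', hq', rfl⟩
            exact not_lt.mpr (le_of_lt (hrest'gt q' hq'))
        rw [hz]
        simp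
      · have hknot : (k : Int) ∉ (p :: rest).map Prod.fst := by
          rw [← hsplit, List.map_append, List.mem_append]
          rintro (h | h)
          · exact hkgrp h
          · exact hkrest h
        rw [if_neg hkgrp, if_neg hknot]

-- A's key (char, index) is the lexicographic ordering
theorem pvSorted2_eq_sorted_lex (xs : List (Int × Char)) :
    PySem.List.sorted2 xs (fun x => x.2) (fun x => x.1)
      = PySem.List.sorted xs (fun x => (toLex (x.2, x.1) : Char ×ₗ Int)) := by
  rw [PySem.List.sorted_eq_foldl_insertBy]
  unfold PySem.List.sorted2
  simp only [if_neg (by decide : ¬ (false = true))]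
  congr 1
  funext acc x
  congr 1
  funext a b
  simp only [Prod.Lex.toLex_lt_toLex]
  by_cases h1 : a.2 < b.2
  · simp [h1]
  · by_cases h2 : b.2 < a.2
    · simp [h1, h2, ne_of_gt h2]
    · have heq : a.2 = b.2 := le_antisymm (not_lt.mp h2) (not_lt.mp h1)
      simp [heq]

theorem pvDict_notmem (pairs : List (Int × Char)) (d : PySem.Dict Char Int) (c : Char)
    (h : ∀ p ∈ pairs, p.2 ≠ c) :
    (pairs.foldl (fun d p => d.insert p.2 p.1) d).get? c = d.get? c := by
  induction pairs generalizing d with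
  | nil => rfl
  | cons p rest ih =>
    simp only [List.foldl_cons]
    rw [ih _ (fun q hq => h q (List.mem_cons_of_mem _ hq)),
        PySem.Dict.get?_insert_of_ne _ _ (Ne.symm (h p List.mem_cons_self))]

-- B's dict: lookup of c gives start + index of c in the (nodup) list
theorem pvDict_get? (l : List Char) : ∀ (s : Int) (d : PySem.Dict Char Int),
    l.Nodup → (∀ x ∈ l, d.contains x = false) → ∀ c ∈ l,
    ((PySem.List.enumerate l s).foldl (fun d p => d.insert p.2 p.1) d).get? c
      = some (s + (l.idxOf c : Int)) := by
  induction l with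
  | nil => intro _ _ _ _ c hc; simp at hc
  | cons a t ih =>
    intro s d hnd hcont c hc
    rw [PySem.List.enumerate_cons]
    simp only [List.foldl_cons]
    rcases List.mem_cons.mp hc with rfl | hct
    · have hat : c ∉ t := (List.nodup_cons.mp hnd).1
      rw [pvDict_notmem _ _ _ ?hne]
      · rw [PySem.Dict.get?_insert_self]
        simp
      case hne =>
        intro p hp
        rcases (PySem.List.mem_enumerate_iff t (s+1) p).mp hp with ⟨k, hk, rfl⟩
        intro he; exact hat (he ▸ List.getElem_mem hk)
    · have hne : a ≠ c := fun he => (List.nodup_cons.mp hnd).1 (he ▸ hct)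
      rw [ih (s+1) (d.insert a s) (List.nodup_cons.mp hnd).2 ?_ c hct]
      · have hb : (a == c) = false := beq_eq_false_iff_ne.mpr hne
        simp only [List.idxOf_cons, hb, cond_false]
        congr 1
        push_cast
        ring
      · intro x hx
        rw [PySem.Dict.contains_insert]
        have : (x == a) = false := beq_eq_false_iff_ne.mpr (fun he => (List.nodup_cons.mp hnd).1 (he ▸ hx))
        simp [this, hcont x (List.mem_cons_of_mem _ hx)]

-- in a strictly increasing list, the index of a member is the number of smaller elements
theorem pvIdxOf_strict (l : List Char) (hs : l.Pairwise (· < ·)) :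
    ∀ c ∈ l, l.idxOf c = l.countP (fun d => decide (d < c)) := by
  induction l with
  | nil => intro c hc; simp at hc
  | cons a t ih =>
    intro c hc
    rcases List.pairwise_cons.mp hs with ⟨ha, ht⟩
    rcases List.mem_cons.mp hc with rfl | hct
    · have h0 : t.countP (fun d => decide (d < c)) = 0 := by
        rw [List.countP_eq_zero]
        intro d hd
        simp only [decide_eq_true_eq]
        exact not_lt.mpr (le_of_lt (ha d hd))
      simp [h0]
    · have hac : a < c := ha c hct
      have hne : a ≠ c := ne_of_lt hac
      rw [List.idxOf_cons, List.countP_cons]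
      have hb : (a == c) = false := beq_eq_false_iff_ne.mpr hne
      simp [hb, hac, ih ht c hct, Nat.add_comm]

-- ===== VERDICT (by name: the statement is the Claim_ definition above) =====
theorem get_column_order_spec : Claim_equal_get_column_order := by
  unfold Claim_equal_get_column_order Spec_get_column_order
  intro key _
  unfold get_column_order get_column_order_alt
  set ku := PySem.Chars.upper key.toList with hku
  set distinct := PySem.List.sorted (PySem.Set.ofList ku) (fun c => c) with hdist
  have hdpl : distinct.Pairwise (· < ·) := PySem.List.sorted_ofList_pairwise_lt ku
  have hdnd : distinct.Nodup := hdpl.imp ne_of_lt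
  have hdmem : ∀ c, c ∈ distinct ↔ c ∈ ku := by
    intro c
    rw [hdist, PySem.List.mem_sorted, PySem.Set.mem_ofList]
  -- B's value at a char c of ku is pvDcount ku c
  have hB : ∀ c ∈ ku,
      (PySem.Dict.get? ((PySem.List.enumerate distinct).foldl (fun d p => d.insert p.2 p.1)
        (PySem.Dict.empty : PySem.Dict Char Int)) c).getD 0 = (pvDcount ku c : Int) := by
    intro c hc
    rw [pvDict_get? distinct 0 _ hdnd (fun x _ => PySem.Dict.contains_empty x) c ((hdmem c).mpr hc)]
    rw [Option.getD_some, zero_add]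
    congr 1
    rw [pvIdxOf_strict distinct hdpl c ((hdmem c).mpr hc)]
    rw [List.countP_eq_length_filter]
    rw [← List.toFinset_card_of_nodup (hdnd.filter _), List.toFinset_filter]
    have hft : distinct.toFinset = ku.toFinset := by
      ext x; simp [← hdmem x]
    unfold pvDcount
    rw [hft]
    simp
  -- A's pair list
  set sc := PySem.List.sorted2 (PySem.List.enumerate ku) (fun x => x.2) (fun x => x.1) with hsc
  have hscs : sc = PySem.List.sorted (PySem.List.enumerate ku)
      (fun x => (toLex (x.2, x.1) : Char ×ₗ Int)) := pvSorted2_eq_sorted_lex _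
  have hperm : sc.Perm (PySem.List.enumerate ku) := by
    rw [hscs]; exact PySem.List.sorted_perm _ _ _
  have hpair : sc.Pairwise (fun p q : Int × Char => p.2 ≤ q.2) := by
    rw [hscs]
    refine (PySem.List.sorted_pairwise _ _).imp ?_
    intro a b hab
    rcases Prod.Lex.toLex_le_toLex.mp hab with h | h
    · exact le_of_lt h
    · exact le_of_eq h.1
  have hbnds : ∀ p ∈ sc, 0 ≤ p.1 ∧ p.1.toNat < ku.length ∧ ku[p.1.toNat]? = some p.2 := by
    intro p hp
    rcases (PySem.List.mem_enumerate_iff ku 0 p).mp (hperm.mem_iff.mp hp) with ⟨k, hk, rfl⟩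
    refine ⟨by omega, by simpa using hk, ?_⟩
    have : ((0 : Int) + (k : Int)).toNat = k := by omega
    rw [this]
    exact List.getElem?_eq_getElem hk
  have hspec := pvLoopA_spec ku sc 0 (List.replicate ku.length (0 : Int)) hpair hbnds
    (List.length_replicate)
  refine List.ext_getElem? ?_
  intro i
  by_cases hi : i < ku.length
  · rw [hspec i hi]
    have hmem : (i : Int) ∈ sc.map Prod.fst := by
      refine List.mem_map.mpr ⟨((0 : Int) + (i : Int), ku[i]), ?_, by simp⟩
      rw [hperm.mem_iff]
      exact (PySem.List.mem_enumerate_iff ku 0 _).mpr ⟨i, hi, rfl⟩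
    rw [if_pos hmem]
    have hcc : pvDcount (sc.map Prod.snd) (ku[i]) = pvDcount ku (ku[i]) := by
      refine pvDcount_congr _ _ _ ?_
      intro x
      rw [(hperm.map Prod.snd).mem_iff]
      have : (PySem.List.enumerate ku 0).map Prod.snd = ku := PySem.List.map_snd_enumerate ku 0
      rw [this]
    rw [hcc]
    rw [List.getElem?_map, List.getElem?_eq_getElem hi, Option.map_some, ← hdist,
        hB (ku[i]) (List.getElem_mem hi)]
    simp
  · have h1 : (pvLoopA sc 0 (List.replicate ku.length (0 : Int))).length ≤ i := by
      rw [pvLoopA_length, List.length_replicate]; omega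
    rw [List.getElem?_eq_none h1, List.getElem?_eq_none (by rw [List.length_map]; omega)]
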